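-- pv_equiv track=rewrite | github.com/GuyMannDude/mnemo-cortex | passport/validation.py | _strongest
-- ===== SOURCE A (Python) =====
-- DISPOSITION_ORDER = ("allow", "review_required", "local_only", "hard_block")
--
-- def _strongest(disps) -> str:
--     best = "allow"
--     best_rank = 0
--     for d in disps:
--         try:
--             rank = DISPOSITION_ORDER.index(d)
--         except ValueError:
--             continue
--         if rank > best_rank:
--             best = d
--             best_rank = rank
--     return best
-- ===== SOURCE B (Python) =====
-- DISPOSITION_ORDER = ("allow", "review_required", "local_only", "hard_block")
--
-- def _strongest(disps) -> str:
--     present = set(disps)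
--     for d in ("hard_block", "local_only", "review_required"):
--         if d in present:
--             return d
--     return "allow"
-- ===== Notes on version B (the rewrite author's own statement) =====
-- stated objective: faster
-- what changed: B builds a set of the input once and returns the first disposition present when scanning the fixed priority tuple strongest-first, instead of scanning the input while maintaining a running best/rank via tuple.index per element.
import Mathlib
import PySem

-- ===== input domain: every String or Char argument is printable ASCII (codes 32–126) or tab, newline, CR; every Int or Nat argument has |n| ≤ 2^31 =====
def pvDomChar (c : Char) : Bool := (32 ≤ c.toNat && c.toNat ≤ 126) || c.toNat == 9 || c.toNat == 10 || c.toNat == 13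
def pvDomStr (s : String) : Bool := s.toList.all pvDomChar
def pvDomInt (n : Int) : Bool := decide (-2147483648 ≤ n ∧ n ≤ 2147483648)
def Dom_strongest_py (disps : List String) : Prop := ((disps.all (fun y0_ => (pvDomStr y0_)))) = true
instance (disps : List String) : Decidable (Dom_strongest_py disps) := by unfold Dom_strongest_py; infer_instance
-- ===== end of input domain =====

-- B re-implements A's rank-tracking scan as a strongest-first lookup over the priority
-- tuple against a set of the input; same return value, different traversal (idiomatic).

-- ===== PORT A =====
def pvDispositionOrder : List String := ["allow", "review_required", "local_only", "hard_block"]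

-- the for-loop of A: state (best, best_rank); tuple.index with try/except via index? = none
def strongestALoop : List String → String → Nat → String
  | [], best, _ => best
  | d :: rest, best, bestRank =>
    match PySem.List.index? pvDispositionOrder d with
    | none => strongestALoop rest best bestRank          -- ValueError: continue
    | some rank =>
      if rank > bestRank then strongestALoop rest d rank
      else strongestALoop rest best bestRank

def strongest_py (disps : List String) : String :=
  strongestALoop disps "allow" 0

-- ===== PORT B =====
def strongest_py_alt (disps : List String) : String :=
  let present : PySem.Set String := PySem.Set.ofList disps
  match ["hard_block", "local_only", "review_required"].find? (fun d => PySem.Set.contains present d) with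
  | some d => d
  | none => "allow"

-- ===== PRECONDITION & SPEC =====
def Spec_strongest_py (disps : List String) (out : String) : Prop := out = strongest_py_alt disps
instance (disps : List String) (out : String) : Decidable (Spec_strongest_py disps out) := by unfold Spec_strongest_py; infer_instance

-- ===== CLAIM (what is proved, stated in full; the proofs are below) =====
def Claim_equal_strongest_py : Prop := ∀ (disps : List String), Dom_strongest_py disps → Spec_strongest_py disps (strongest_py disps)

-- ===== LEMMAS AND PROOFS =====

-- Characterisation of A's loop for any state (best, r): the result is the strongest
-- disposition in the remaining list whose rank exceeds r, else the carried best.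
theorem strongestALoop_char (t : List String) (b : String) (r : Nat) :
    strongestALoop t b r =
      if "hard_block" ∈ t ∧ r < 3 then "hard_block"
      else if "local_only" ∈ t ∧ r < 2 then "local_only"
      else if "review_required" ∈ t ∧ r < 1 then "review_required"
      else b := by
  induction t generalizing b r with
  | nil => simp [strongestALoop]
  | cons d t ih =>
    have ne1 : "hard_block" ≠ "local_only" := by decide
    have ne2 : "hard_block" ≠ "review_required" := by decide
    have ne3 : "local_only" ≠ "hard_block" := by decide
    have ne4 : "local_only" ≠ "review_required" := by decide
    have ne5 : "review_required" ≠ "hard_block" := by decide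
    have ne6 : "review_required" ≠ "local_only" := by decide
    by_cases h1 : d = "hard_block"
    · subst h1
      simp only [strongestALoop, pvDispositionOrder]
      rw [show PySem.List.index? ["allow", "review_required", "local_only", "hard_block"]
            "hard_block" = some 3 from by decide]
      simp only [gt_iff_lt]
      split_ifs <;> rw [ih] <;> clear ih <;>
        by_cases hb2 : "hard_block" ∈ t <;> by_cases hl2 : "local_only" ∈ t <;>
          by_cases hv2 : "review_required" ∈ t <;> simp_all <;>
            first
            | omega
            | (split_ifs <;> first | rfl | omega)
    · by_cases h2 : d = "local_only"
      · subst h2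
        simp only [strongestALoop, pvDispositionOrder]
        rw [show PySem.List.index? ["allow", "review_required", "local_only", "hard_block"]
              "local_only" = some 2 from by decide]
        simp only [gt_iff_lt]
        split_ifs <;> rw [ih] <;> clear ih <;>
        by_cases hb2 : "hard_block" ∈ t <;> by_cases hl2 : "local_only" ∈ t <;>
          by_cases hv2 : "review_required" ∈ t <;> simp_all <;>
            first
            | omega
            | (split_ifs <;> first | rfl | omega)
      · by_cases h3 : d = "review_required"
        · subst h3
          simp only [strongestALoop, pvDispositionOrder]
          rw [show PySem.List.index? ["allow", "review_required", "local_only", "hard_block"]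
                "review_required" = some 1 from by decide]
          simp only [gt_iff_lt]
          split_ifs <;> rw [ih] <;> clear ih <;>
        by_cases hb2 : "hard_block" ∈ t <;> by_cases hl2 : "local_only" ∈ t <;>
          by_cases hv2 : "review_required" ∈ t <;> simp_all <;>
            first
            | omega
            | (split_ifs <;> first | rfl | omega)
        · -- d is "allow" or invalid: the state is unchanged either way
          have hstep : strongestALoop (d :: t) b r = strongestALoop t b r := by
            by_cases h0 : d = "allow"
            · subst h0
              simp only [strongestALoop, pvDispositionOrder]
              rw [show PySem.List.index? ["allow", "review_required", "local_only", "hard_block"]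
                    "allow" = some 0 from by decide]
              simp
            · simp only [strongestALoop, pvDispositionOrder]
              rw [show PySem.List.index? ["allow", "review_required", "local_only", "hard_block"] d
                    = none from by
                    rw [PySem.List.index?_eq_none_iff]
                    simp [h0, h3, h2, h1]]
          rw [hstep, ih]
          have e1 : ("hard_block" = d) = False := eq_false (fun h => h1 h.symm)
          have e2 : ("local_only" = d) = False := eq_false (fun h => h2 h.symm)
          have e3 : ("review_required" = d) = False := eq_false (fun h => h3 h.symm)
          simp [List.mem_cons, e1, e2, e3]

theorem find?_alt_char (disps : List String) :
    strongest_py_alt disps =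
      if "hard_block" ∈ disps then "hard_block"
      else if "local_only" ∈ disps then "local_only"
      else if "review_required" ∈ disps then "review_required"
      else "allow" := by
  unfold strongest_py_alt
  have hmem : ∀ x : String,
      PySem.Set.contains (PySem.Set.ofList disps) x = disps.contains x := by
    intro x
    rw [Bool.eq_iff_iff, PySem.Set.contains_iff, PySem.Set.mem_ofList]
    simp
  by_cases hb : "hard_block" ∈ disps <;> by_cases hl : "local_only" ∈ disps <;>
    by_cases hr : "review_required" ∈ disps <;>
      simp [List.find?, hmem, hb, hl, hr]

-- ===== VERDICT (by name: the statement is the Claim_ definition above) =====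
theorem strongest_py_spec : Claim_equal_strongest_py := by
  intro disps _
  unfold Spec_strongest_py strongest_py
  rw [strongestALoop_char, find?_alt_char]
  norm_num
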